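-- pv_equiv track=rewrite | github.com/ilkclord/DittoChess | data/datapacker.py | str2arr
-- ===== SOURCE A (Python) =====
-- chess_dic = {'p': '1',
--              'r': '2',
--              'n': '3',
--              'b': '4',
--              'q': '5',
--              'k': '6',
--              'P': '-1',
--              'R': '-2',
--              'N': '-3',
--              'B': '-4',
--              'Q': '-5',
--              'K': '-6',
--              '.': '0'}
--
-- def chess2int(target):
-- 	return int(chess_dic[str(target)])
--
-- def str2arr(target):
-- 	target = target
-- 	new = []
-- 	for i in range(0, 8):
-- 		new.append([])
-- 	index = 0
-- 	count = 0
-- 	for pos in target: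
-- 		if pos != ' ' and pos != '\n':
-- 			new[index].append(chess2int(pos))
-- 			count = count + 1
-- 			if count % 8 == 0:
-- 				index = index + 1
-- 				count = 0
-- 	return new
-- ===== SOURCE B (Python) =====
-- def _piece_val(c):
--     m = ".prnbqk".index(c.lower())
--     return -m if c.isupper() else m
--
-- def str2arr(target):
--     flat = [_piece_val(c) for c in target if c != ' ' and c != '\n']
--     return [flat[8 * i:8 * i + 8] for i in range(8)]
-- ===== Notes on version B (the rewrite author's own statement) =====
-- stated objective: simpler
-- what changed: Replaces A's dict-of-strings lookup plus single-pass index/count%8 counter machinery by piece values computed arithmetically from the character's position in a value-ordered piece string (negated for uppercase) and rows obtained as eight closed-form slices flat[8*i:8*i+8] of the filtered value list.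
import Mathlib
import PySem

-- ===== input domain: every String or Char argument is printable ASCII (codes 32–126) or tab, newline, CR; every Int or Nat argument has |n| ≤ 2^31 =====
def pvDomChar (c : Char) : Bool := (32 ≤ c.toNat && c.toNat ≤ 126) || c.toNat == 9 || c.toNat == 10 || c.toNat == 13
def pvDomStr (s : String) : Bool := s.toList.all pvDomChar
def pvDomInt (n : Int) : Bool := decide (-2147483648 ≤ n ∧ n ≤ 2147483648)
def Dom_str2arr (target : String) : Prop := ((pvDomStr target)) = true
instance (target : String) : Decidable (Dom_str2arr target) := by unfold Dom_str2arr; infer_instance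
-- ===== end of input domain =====

-- B replaces A's dict lookup and single-pass index/count%8 counter machinery by piece
-- values computed from a position in ".prnbqk" (negated for uppercase) and rows obtained
-- as eight closed-form slices flat[8i:8i+8] (objective: simpler decomposition).

-- ===== PORT A =====
def chess_dic : PySem.Dict String String :=
  PySem.Dict.ofList [("p", "1"), ("r", "2"), ("n", "3"), ("b", "4"), ("q", "5"), ("k", "6"),
   ("P", "-1"), ("R", "-2"), ("N", "-3"), ("B", "-4"), ("Q", "-5"), ("K", "-6"), (".", "0")]

-- int(chess_dic[str(target)]); KeyError/ValueError (none) cannot occur inside Pre_str2arr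
def chess2int (target : String) : Int :=
  ((PySem.Dict.get? chess_dic target).bind PySem.Int.ofStr?).getD 0

def pvStepA (s : List (List Int) × Nat × Nat) (pos : Char) : List (List Int) × Nat × Nat :=
  if pos ≠ ' ' ∧ pos ≠ '\n' then
    let new' := s.1.modify s.2.1 (fun row => row ++ [chess2int (String.ofList [pos])])
    let count' := s.2.2 + 1
    if count' % 8 = 0 then (new', s.2.1 + 1, 0) else (new', s.2.1, count')
  else s

def str2arr (target : String) : List (List Int) :=
  let new : List (List Int) := (List.range 8).foldl (fun acc _ => acc ++ [[]]) []
  -- for pos in target: … ; new[index].append raises IndexError when index = 8, which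
  -- Pre_str2arr excludes; the port's List.modify is a no-op there
  let st := target.toList.foldl pvStepA (new, 0, 0)
  st.1

-- ===== PORT B =====
-- ".prnbqk".index(c.lower()); str.index raises ValueError where find returns -1,
-- which Pre_str2arr excludes
def piece_val (c : Char) : Int :=
  let m : Int := PySem.Chars.find ".prnbqk".toList [PySem.Chars.lowerChar c]
  if PySem.Chars.isupper c then -m else m

def str2arr_alt (target : String) : List (List Int) :=
  let flat : List Int :=
    (target.toList.filter (fun c => !(c == ' ') && !(c == '\n'))).map piece_val
  (List.range 8).map (fun (i : Nat) =>
    PySem.List.slice flat (some (8 * (i : Int))) (some (8 * (i : Int) + 8)))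

-- ===== PRECONDITION & SPEC =====
-- Pre_ excludes inputs on which the Python A raises: a KeyError on any character other
-- than the 13 board characters, space and newline, and an IndexError when more than 64
-- board characters are present.
def Pre_str2arr (target : String) : Prop :=
  (target.toList.filter (fun c => !(c == ' ') && !(c == '\n'))).length ≤ 64 ∧
  ((target.toList.filter (fun c => !(c == ' ') && !(c == '\n'))).all
    (fun c => ['p', 'r', 'n', 'b', 'q', 'k', 'P', 'R', 'N', 'B', 'Q', 'K', '.'].contains c)) = true
instance (target : String) : Decidable (Pre_str2arr target) := by unfold Pre_str2arr; infer_instance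

def pvWitness_str2arr : String := "rn .\nK"

def Spec_str2arr (target : String) (out : List (List Int)) : Prop := out = str2arr_alt target
instance (target : String) (out : List (List Int)) : Decidable (Spec_str2arr target out) := by unfold Spec_str2arr; infer_instance

-- ===== CLAIM (what is proved, stated in full; the proofs are below) =====
def Claim_equal_str2arr : Prop := ∀ (target : String), Dom_str2arr target → Pre_str2arr target → Spec_str2arr target (str2arr target)

-- ===== LEMMAS AND PROOFS =====

-- the 8 rows holding a flat prefix L (L.length ≤ 64): row i is L[8i:8i+8]
def pvRows8 (L : List Int) : List (List Int) :=
  (List.range 8).map (fun i => (L.drop (8 * i)).take 8)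

lemma pvRows8_snoc (L : List Int) (v : Int) :
    (pvRows8 L).modify (L.length / 8) (fun row => row ++ [v]) = pvRows8 (L ++ [v]) := by
  apply List.ext_getElem
  · simp [pvRows8]
  · intro i h1 h2
    rw [List.getElem_modify]
    simp only [pvRows8, List.getElem_map, List.getElem_range]
    have hi : i < 8 := by simpa [pvRows8] using h2
    rcases lt_trichotomy i (L.length / 8) with hlt | heq | hgt
    · -- row fully inside L
      rw [if_neg (by omega)]
      have hle : 8 * i + 8 ≤ L.length := by omega
      rw [List.drop_append_of_le_length (by omega),
        List.take_append_of_le_length (by simp; omega)]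
    · -- the row being extended
      rw [if_pos heq.symm]
      subst heq
      have hd : (L ++ [v]).drop (8 * (L.length / 8)) = L.drop (8 * (L.length / 8)) ++ [v] :=
        List.drop_append_of_le_length (by omega)
      have hlen : (L.drop (8 * (L.length / 8))).length = L.length % 8 := by
        simp; omega
      rw [hd, List.take_of_length_le (by omega),
        List.take_of_length_le (by simp [hlen]; omega)]
    · -- rows past the data: both empty
      rw [if_neg (by omega)]
      have h1 : L.drop (8 * i) = [] := List.drop_eq_nil_of_le (by omega)
      have h2 : (L ++ [v]).drop (8 * i) = [] := List.drop_eq_nil_of_le (by simp; omega)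
      rw [h1, h2]

lemma pv_inv (chars : List Char) (P : List Int)
    (h : P.length + (chars.filter (fun c => !(c == ' ') && !(c == '\n'))).length ≤ 64) :
    (chars.foldl pvStepA (pvRows8 P, P.length / 8, P.length % 8)).1 =
    pvRows8 (P ++ (chars.filter (fun c => !(c == ' ') && !(c == '\n'))).map
      (fun c => chess2int (String.ofList [c]))) := by
  induction chars generalizing P with
  | nil => simp
  | cons c cs ih =>
    by_cases hc : c ≠ ' ' ∧ c ≠ '\n'
    · have hkeep : (!(c == ' ') && !(c == '\n')) = true := by simp [hc.1, hc.2]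
      have hfilter : (c :: cs).filter (fun c => !(c == ' ') && !(c == '\n')) =
          c :: cs.filter (fun c => !(c == ' ') && !(c == '\n')) := by
        simp only [List.filter_cons, hkeep]; rfl
      set v := chess2int (String.ofList [c]) with hv
      have hstep : pvStepA (pvRows8 P, P.length / 8, P.length % 8) c =
          (pvRows8 (P ++ [v]), (P ++ [v]).length / 8, (P ++ [v]).length % 8) := by
        simp only [pvStepA, if_pos hc, ← hv, pvRows8_snoc P v]
        by_cases h8 : (P.length % 8 + 1) % 8 = 0
        · rw [if_pos h8]; simp; constructor <;> omega
        · rw [if_neg h8]; simp; constructor <;> omega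
      rw [hfilter, List.foldl_cons, hstep, ih (P ++ [v]) (by rw [hfilter] at h; simp at h ⊢; omega)]
      simp only [hv, List.append_assoc, List.singleton_append, List.map_cons]
    · have hkeep : (!(c == ' ') && !(c == '\n')) = false := by
        by_cases h1 : c = ' '
        · simp [h1]
        · have h2 : c = '\n' := by tauto
          simp [h2]
      have hfilter : (c :: cs).filter (fun c => !(c == ' ') && !(c == '\n')) =
          cs.filter (fun c => !(c == ' ') && !(c == '\n')) := by
        simp only [List.filter_cons, hkeep]; rfl
      have hstep : pvStepA (pvRows8 P, P.length / 8, P.length % 8) c =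
          (pvRows8 P, P.length / 8, P.length % 8) := by
        simp only [pvStepA, if_neg hc]
      rw [hfilter, List.foldl_cons, hstep, ih P (by rw [hfilter] at h; exact h)]

-- on the 13 valid board characters A's dict lookup and B's string-index formula agree
lemma pv_val_eq (c : Char)
    (hc : (['p', 'r', 'n', 'b', 'q', 'k', 'P', 'R', 'N', 'B', 'Q', 'K', '.'].contains c) = true) :
    chess2int (String.ofList [c]) = piece_val c := by
  simp only [List.contains_eq_mem, List.mem_cons, decide_eq_true_eq] at hc
  rcases hc with rfl|rfl|rfl|rfl|rfl|rfl|rfl|rfl|rfl|rfl|rfl|rfl|rfl|h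
  all_goals first | decide | simp at h

-- the eight range(8) slices flat[8i:8i+8] are exactly pvRows8 flat
lemma pvRows8_eq_slices (L : List Int) :
    (List.range 8).map (fun (i : Nat) =>
      PySem.List.slice L (some (8 * (i : Int))) (some (8 * (i : Int) + 8))) = pvRows8 L := by
  apply List.map_congr_left
  intro i _
  rw [show (8 * (i : Int)) = ((8 * i : Nat) : Int) by push_cast; ring,
    show (((8 * i : Nat) : Int) + 8) = ((8 * i : Nat) : Int) + ((8 : Nat) : Int) by push_cast; ring,
    PySem.List.slice_natCast_add]

-- ===== VERDICT (by name: the statement is the Claim_ definition above) =====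
theorem str2arr_spec : Claim_equal_str2arr := by
  intro target _ hpre
  show str2arr target = str2arr_alt target
  have hmap :
      (target.toList.filter (fun c => !(c == ' ') && !(c == '\n'))).map
        (fun c => chess2int (String.ofList [c])) =
      (target.toList.filter (fun c => !(c == ' ') && !(c == '\n'))).map piece_val := by
    apply List.map_congr_left
    intro c hcmem
    exact pv_val_eq c (by
      have := hpre.2
      rw [List.all_eq_true] at this
      exact this c hcmem)
  have h := pv_inv target.toList [] (by simpa using hpre.1)
  simp only [List.length_nil, Nat.zero_div, Nat.zero_mod, List.nil_append] at h
  have hinit : ((List.range 8).foldl (fun acc _ => acc ++ [[]]) ([] : List (List Int))) =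
      pvRows8 [] := by rfl
  simp only [str2arr, str2arr_alt, hinit]
  rw [h, hmap, pvRows8_eq_slices]
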